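-- pv_equiv track=rewrite | github.com/brightlikethelight/music-gen-ai | scripts/git/smart_squash.py | suggest_squash_plan
-- ===== SOURCE A (Python) =====
-- from typing import List, Dict, Tuple
--
-- def suggest_squash_plan(
--     groups: Dict[str, List[Dict[str, str]]],
-- ) -> List[Tuple[str, List[Dict[str, str]]]]:
--     """Suggest a squash plan based on commit groups."""
--     plan = []
--
--     # Define the order we want categories to appear
--     category_order = [
--         "initial",
--         "feature",
--         "model",
--         "api",
--         "ui",
--         "fix",
--         "refactor",
--         "test",
--         "docs",
--         "style",
--         "chore",
--         "other",
--     ]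
--
--     for category in category_order:
--         if category in groups and groups[category]:
--             # For each category, we might want to further subdivide
--             commits = groups[category]
--
--             if len(commits) > 5 and category in ["feature", "fix"]:
--                 # Break large groups into smaller logical units
--                 # For now, just split by time (could be more sophisticated)
--                 subgroups = []
--                 current_group = [commits[0]]
--
--                 for i in range(1, len(commits)):
--                     # You could add time-based splitting here
--                     current_group.append(commits[i])
--
--                     if len(current_group) >= 3:
--                         subgroups.append((f"{category}_{len(subgroups)+1}", current_group))
--                         current_group = []
--
--                 if current_group:
--                     subgroups.append((f"{category}_{len(subgroups)+1}", current_group))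
--
--                 plan.extend(subgroups)
--             else:
--                 plan.append((category, commits))
--
--     return plan
-- ===== SOURCE B (Python) =====
-- def _chunks3(xs):
--     """Split xs into consecutive chunks of 3 (last chunk may be shorter), by recursion on slices."""
--     if not xs:
--         return []
--     return [xs[:3]] + _chunks3(xs[3:])
--
--
-- def suggest_squash_plan(groups):
--     """Suggest a squash plan based on commit groups."""
--     category_order = [
--         "initial",
--         "feature",
--         "model",
--         "api",
--         "ui",
--         "fix",
--         "refactor",
--         "test",
--         "docs",
--         "style",
--         "chore",
--         "other",
--     ]
--
--     plan = []
--     for category in category_order: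
--         commits = groups.get(category)
--         if not commits:
--             continue
--         if (category == "feature" or category == "fix") and len(commits) > 5:
--             plan.extend(
--                 (f"{category}_{k}", chunk)
--                 for k, chunk in enumerate(_chunks3(commits), 1)
--             )
--         else:
--             plan.append((category, commits))
--     return plan
-- ===== Notes on version B (the rewrite author's own statement) =====
-- stated objective: simpler
-- what changed: The one-at-a-time accumulator loop with a manual flush is replaced by a recursive slice-based chunker (xs[:3] / xs[3:]) whose chunks are labelled with enumerate, removing the current_group/subgroups state.
import Mathlib
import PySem

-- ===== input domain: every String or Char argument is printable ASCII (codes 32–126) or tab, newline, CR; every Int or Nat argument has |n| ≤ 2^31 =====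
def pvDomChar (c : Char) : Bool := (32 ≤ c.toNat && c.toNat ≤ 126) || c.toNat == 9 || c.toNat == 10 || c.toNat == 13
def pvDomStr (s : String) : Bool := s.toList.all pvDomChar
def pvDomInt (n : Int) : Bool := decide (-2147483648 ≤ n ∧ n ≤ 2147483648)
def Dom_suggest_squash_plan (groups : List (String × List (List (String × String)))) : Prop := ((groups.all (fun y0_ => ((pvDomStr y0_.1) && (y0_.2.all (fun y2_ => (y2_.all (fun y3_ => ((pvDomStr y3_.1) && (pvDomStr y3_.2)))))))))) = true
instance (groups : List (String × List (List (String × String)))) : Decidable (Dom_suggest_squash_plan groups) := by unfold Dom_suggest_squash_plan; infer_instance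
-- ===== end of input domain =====

-- B replaces A's one-at-a-time accumulator loop (current_group + manual flush) by a recursive
-- slice-based chunker (xs[:3] / xs[3:]) whose chunks are labelled with enumerate; objective: simpler.

-- ===== PORT A =====
-- A's inner-loop body: current_group.append(commits[i]); flush when len(current_group) >= 3
def pvStepA (category : String)
    (st : List (String × List (List (String × String))) × List (List (String × String)))
    (c : List (String × String)) :
    List (String × List (List (String × String))) × List (List (String × String)) :=
  let cur := st.2 ++ [c]
  if 3 ≤ cur.length then
    (st.1 ++ [(category ++ "_" ++ PySem.Int.toStr ((st.1.length : Int) + 1), cur)],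
     ([] : List (List (String × String))))
  else (st.1, cur)

-- A's large-group branch: the for-i-in-range(1, len) loop plus the trailing flush
def pvSplitA (category : String) (commits : List (List (String × String))) :
    List (String × List (List (String × String))) :=
  let st := (PySem.List.pyRange 1 (commits.length : Int)).foldl
      (fun st i => pvStepA category st (PySem.List.pyGetD commits i []))
      ([], [PySem.List.pyGetD commits 0 []])
  if st.2 ≠ [] then
    st.1 ++ [(category ++ "_" ++ PySem.Int.toStr ((st.1.length : Int) + 1), st.2)]
  else st.1

-- one iteration of A's loop over category_order
def pvBodyA (groups : List (String × List (List (String × String))))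
    (plan : List (String × List (List (String × String)))) (category : String) :
    List (String × List (List (String × String))) :=
  match (PySem.Dict.mk groups).get? category with
  | some commits =>
    if commits ≠ [] then
      if 5 < commits.length ∧ category ∈ (["feature", "fix"] : List String) then
        plan ++ pvSplitA category commits
      else plan ++ [(category, commits)]
    else plan
  | none => plan

def suggest_squash_plan (groups : List (String × List (List (String × String)))) : List (String × (List (List (String × String)))) :=
  (["initial", "feature", "model", "api", "ui", "fix", "refactor", "test", "docs",
    "style", "chore", "other"] : List String).foldl (pvBodyA groups) []

-- ===== PORT B =====
-- B's helper _chunks3: [xs[:3]] + _chunks3(xs[3:]) if xs else []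
def pvChunks3 (xs : List (List (String × String))) : List (List (List (String × String))) :=
  if h : xs = [] then []
  else PySem.List.slice xs none (some 3) :: pvChunks3 (PySem.List.slice xs (some 3) none)
termination_by xs.length
decreasing_by
  rw [PySem.List.slice_from xs (by norm_num : (0:Int) ≤ 3)]
  have : xs.length ≠ 0 := by simpa [List.length_eq_zero_iff] using h
  simp only [List.length_drop]
  omega

-- one iteration of B's loop over category_order
def pvBodyB (groups : List (String × List (List (String × String))))
    (plan : List (String × List (List (String × String)))) (category : String) :
    List (String × List (List (String × String))) :=
  match (PySem.Dict.mk groups).get? category with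
  | none => plan
  | some commits =>
    if commits = [] then plan
    else if (category = "feature" ∨ category = "fix") ∧ 5 < commits.length then
      plan ++ (PySem.List.enumerate (pvChunks3 commits) 1).map
        (fun kc => (category ++ "_" ++ PySem.Int.toStr kc.1, kc.2))
    else plan ++ [(category, commits)]

def suggest_squash_plan_alt (groups : List (String × List (List (String × String)))) : List (String × (List (List (String × String)))) :=
  (["initial", "feature", "model", "api", "ui", "fix", "refactor", "test", "docs",
    "style", "chore", "other"] : List String).foldl (pvBodyB groups) []

-- ===== PRECONDITION & SPEC =====
def Spec_suggest_squash_plan (groups : List (String × List (List (String × String)))) (out : List (String × (List (List (String × String))))) : Prop := out = suggest_squash_plan_alt groups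
instance (groups : List (String × List (List (String × String)))) (out : List (String × (List (List (String × String))))) : Decidable (Spec_suggest_squash_plan groups out) := by unfold Spec_suggest_squash_plan; infer_instance

-- ===== CLAIM (what is proved, stated in full; the proofs are below) =====
def Claim_equal_suggest_squash_plan : Prop := ∀ (groups : List (String × List (List (String × String)))), Dom_suggest_squash_plan groups → Spec_suggest_squash_plan groups (suggest_squash_plan groups)

-- ===== LEMMAS AND PROOFS =====

-- B's labelled chunks, written as a direct recursion (proof-side characterisation)
def pvLabelFrom (category : String) (k : Int) :
    List (List (List (String × String))) → List (String × List (List (String × String)))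
  | [] => []
  | c :: cs => (category ++ "_" ++ PySem.Int.toStr k, c) :: pvLabelFrom category (k + 1) cs

theorem pvEnumMap_eq (category : String) (cs : List (List (List (String × String)))) :
    ∀ k : Int, (PySem.List.enumerate cs k).map
        (fun kc => (category ++ "_" ++ PySem.Int.toStr kc.1, kc.2)) = pvLabelFrom category k cs := by
  induction cs with
  | nil => intro k; simp [PySem.List.enumerate_nil, pvLabelFrom]
  | cons c cs ih => intro k; simp [PySem.List.enumerate_cons, pvLabelFrom, ih]

theorem pvChunks3_cons (xs : List (List (String × String))) (h : xs ≠ []) :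
    pvChunks3 xs = xs.take 3 :: pvChunks3 (xs.drop 3) := by
  rw [pvChunks3]
  simp [h, PySem.List.slice_to xs (by norm_num : (0:Int) ≤ 3),
        PySem.List.slice_from xs (by norm_num : (0:Int) ≤ 3)]

-- A's trailing flush
def pvFinish (category : String)
    (st : List (String × List (List (String × String))) × List (List (String × String))) :
    List (String × List (List (String × String))) :=
  if st.2 ≠ [] then
    st.1 ++ [(category ++ "_" ++ PySem.Int.toStr ((st.1.length : Int) + 1), st.2)]
  else st.1

-- Invariant of A's accumulator loop: flushing the fold's final state yields the labelled 3-chunks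
theorem pvLoopA_eq (category : String) :
    ∀ (rest : List (List (String × String)))
      (sg : List (String × List (List (String × String)))) (cur : List (List (String × String))),
      cur.length < 3 →
      pvFinish category (rest.foldl (pvStepA category) (sg, cur)) =
        sg ++ pvLabelFrom category ((sg.length : Int) + 1) (pvChunks3 (cur ++ rest)) := by
  intro rest
  induction rest with
  | nil =>
    intro sg cur hcur
    by_cases hc : cur = []
    · subst hc; simp [pvFinish, pvChunks3, pvLabelFrom]
    · simp only [List.foldl_nil, List.append_nil, pvFinish]
      rw [pvChunks3_cons cur hc,
          List.take_of_length_le (by omega), List.drop_eq_nil_of_le (by omega)]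
      simp [pvChunks3, pvLabelFrom, hc]
  | cons x rest ih =>
    intro sg cur hcur
    simp only [List.foldl_cons]
    by_cases hc : cur.length = 2
    · have hstep : pvStepA category (sg, cur) x =
          (sg ++ [(category ++ "_" ++ PySem.Int.toStr ((sg.length : Int) + 1), cur ++ [x])], []) := by
        simp [pvStepA, hc]
      rw [hstep, ih _ _ (by norm_num)]
      have hlen3 : (cur ++ [x]).length = 3 := by simp [hc]
      have hx : cur ++ x :: rest = (cur ++ [x]) ++ rest := by simp
      simp only [List.nil_append]
      rw [hx]
      conv_rhs => rw [pvChunks3_cons ((cur ++ [x]) ++ rest) (by simp),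
          ← hlen3, List.take_left, List.drop_left]
      have hk : (((sg ++ [(category ++ "_" ++ PySem.Int.toStr ((sg.length : Int) + 1), cur ++ [x])]).length : Int) + 1)
          = ((sg.length : Int) + 1) + 1 := by
        push_cast [List.length_append, List.length_cons, List.length_nil]; ring
      rw [hk]
      simp [pvLabelFrom]
    · have hstep : pvStepA category (sg, cur) x = (sg, cur ++ [x]) := by
        simp only [pvStepA]
        rw [if_neg (by simp only [List.length_append, List.length_cons, List.length_nil]; omega)]
      rw [hstep, ih _ _ (by
        simp only [List.length_append, List.length_cons, List.length_nil]; omega)]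
      simp

theorem pvSplitA_eq (category : String) (commits : List (List (String × String)))
    (h : commits ≠ []) :
    pvSplitA category commits = (PySem.List.enumerate (pvChunks3 commits) 1).map
      (fun kc => (category ++ "_" ++ PySem.Int.toStr kc.1, kc.2)) := by
  obtain ⟨c0, cs, rfl⟩ := List.exists_cons_of_ne_nil h
  show pvFinish category _ = _
  rw [PySem.List.foldl_pyRange_pyGetD' (c0 :: cs) [] (pvStepA category) _ (by norm_num : (0:Int) ≤ 1)]
  have h0 : PySem.List.pyGetD (c0 :: cs) 0 [] = c0 := by
    simp [PySem.List.pyGetD, PySem.List.pyGet?, PySem.List.pyIdx?]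
  rw [h0]
  have hdrop : List.drop (1:Int).toNat (c0 :: cs) = cs := by simp
  rw [hdrop, pvLoopA_eq category cs [] [c0] (by norm_num), pvEnumMap_eq]
  simp

theorem pvBody_eq (groups : List (String × List (List (String × String))))
    (plan : List (String × List (List (String × String)))) (category : String) :
    pvBodyA groups plan category = pvBodyB groups plan category := by
  unfold pvBodyA pvBodyB
  cases hget : (PySem.Dict.mk groups).get? category with
  | none => rfl
  | some commits =>
    dsimp only
    by_cases hnil : commits = []
    · simp [hnil]
    · rw [if_pos hnil, if_neg hnil]
      have hcond : (5 < commits.length ∧ category ∈ (["feature", "fix"] : List String)) ↔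
          ((category = "feature" ∨ category = "fix") ∧ 5 < commits.length) := by
        simp [List.mem_cons, and_comm]
      by_cases hbig : (category = "feature" ∨ category = "fix") ∧ 5 < commits.length
      · rw [if_pos (hcond.mpr hbig), if_pos hbig, pvSplitA_eq category commits hnil]
      · rw [if_neg (fun hh => hbig (hcond.mp hh)), if_neg hbig]

-- ===== VERDICT (by name: the statement is the Claim_ definition above) =====
theorem suggest_squash_plan_spec : Claim_equal_suggest_squash_plan := by
  intro groups _
  show suggest_squash_plan groups = suggest_squash_plan_alt groups
  unfold suggest_squash_plan suggest_squash_plan_alt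
  have hb : pvBodyA groups = pvBodyB groups :=
    funext fun plan => funext fun category => pvBody_eq groups plan category
  rw [hb]
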